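-- pv_equiv track=rewrite | github.com/buh07/RL-Decoder-using-SAE-Features | phase7/prontoqa_prepare_dataset.py | _find_token_for_char
-- ===== SOURCE A (Python) =====
-- from typing import Any, Dict, Iterator, List, Optional, Sequence, Tuple
--
-- def _find_token_for_char(offsets: Sequence[Tuple[int, int]], char_pos: int) -> Optional[int]:
--     for i, (s, e) in enumerate(offsets):
--         if int(s) <= int(char_pos) < int(e):
--             return int(i)
--     best = None
--     for i, (s, e) in enumerate(offsets):
--         if int(s) <= int(char_pos):
--             best = int(i)
--     return best
-- ===== SOURCE B (Python) =====
-- from typing import Optional, Sequence, Tuple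
--
-- def _find_token_for_char(offsets: Sequence[Tuple[int, int]], char_pos: int) -> Optional[int]:
--     best = None
--     for i, (s, e) in enumerate(offsets):
--         if int(s) <= int(char_pos) < int(e):
--             return int(i)
--         if int(s) <= int(char_pos):
--             best = int(i)
--     return best
-- ===== Notes on version B (the rewrite author's own statement) =====
-- stated objective: simpler
-- what changed: Merges A's two separate scans (first for a containing span, then a full rescan for the last span starting at or before the position) into a single pass that returns immediately on a containing span and otherwise tracks the last start<=pos index.
import Mathlib
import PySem

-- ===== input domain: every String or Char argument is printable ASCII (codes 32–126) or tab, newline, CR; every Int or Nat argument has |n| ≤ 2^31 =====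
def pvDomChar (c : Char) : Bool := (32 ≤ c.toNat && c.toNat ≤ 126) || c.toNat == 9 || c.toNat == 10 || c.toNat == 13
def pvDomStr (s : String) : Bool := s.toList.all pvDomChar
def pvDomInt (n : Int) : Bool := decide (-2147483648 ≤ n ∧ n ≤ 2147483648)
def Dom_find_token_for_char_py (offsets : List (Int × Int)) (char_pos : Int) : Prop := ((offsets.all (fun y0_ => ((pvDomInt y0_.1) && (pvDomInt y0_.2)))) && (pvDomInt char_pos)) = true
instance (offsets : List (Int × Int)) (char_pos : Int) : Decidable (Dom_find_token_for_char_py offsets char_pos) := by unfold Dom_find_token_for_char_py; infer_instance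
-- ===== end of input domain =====

-- B merges A's two separate scans into a single pass; same return value everywhere (both total).

-- ===== PORT A =====
-- first loop of A: return the first index whose span contains char_pos
def ftfcA_loop1 (char_pos : Int) : List (Int × Int) → Int → Option Int
  | [], _ => none
  | (s, e) :: rest, i => if s ≤ char_pos ∧ char_pos < e then some i else ftfcA_loop1 char_pos rest (i + 1)

-- second loop of A: best := last index with s ≤ char_pos
def ftfcA_loop2 (char_pos : Int) : List (Int × Int) → Int → Option Int → Option Int
  | [], _, best => best
  | (s, _) :: rest, i, best => ftfcA_loop2 char_pos rest (i + 1) (if s ≤ char_pos then some i else best)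

def find_token_for_char_py (offsets : List (Int × Int)) (char_pos : Int) : Option Int :=
  match ftfcA_loop1 char_pos offsets 0 with
  | some i => some i
  | none => ftfcA_loop2 char_pos offsets 0 none

-- ===== PORT B =====
-- single pass: return on a containing span, otherwise remember last start ≤ char_pos
def ftfcB_loop (char_pos : Int) : List (Int × Int) → Int → Option Int → Option Int
  | [], _, best => best
  | (s, e) :: rest, i, best =>
    if s ≤ char_pos ∧ char_pos < e then some i
    else ftfcB_loop char_pos rest (i + 1) (if s ≤ char_pos then some i else best)

def find_token_for_char_py_alt (offsets : List (Int × Int)) (char_pos : Int) : Option Int :=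
  ftfcB_loop char_pos offsets 0 none

-- ===== PRECONDITION & SPEC =====
def Spec_find_token_for_char_py (offsets : List (Int × Int)) (char_pos : Int) (out : Option Int) : Prop := out = find_token_for_char_py_alt offsets char_pos
instance (offsets : List (Int × Int)) (char_pos : Int) (out : Option Int) : Decidable (Spec_find_token_for_char_py offsets char_pos out) := by unfold Spec_find_token_for_char_py; infer_instance

-- ===== CLAIM (what is proved, stated in full; the proofs are below) =====
def Claim_equal_find_token_for_char_py : Prop := ∀ (offsets : List (Int × Int)) (char_pos : Int), Dom_find_token_for_char_py offsets char_pos → Spec_find_token_for_char_py offsets char_pos (find_token_for_char_py offsets char_pos)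

-- ===== LEMMAS AND PROOFS =====
theorem ftfc_merge (char_pos : Int) (xs : List (Int × Int)) (i : Int) (best : Option Int) :
    (match ftfcA_loop1 char_pos xs i with
     | some j => some j
     | none => ftfcA_loop2 char_pos xs i best) = ftfcB_loop char_pos xs i best := by
  induction xs generalizing i best with
  | nil => simp [ftfcA_loop1, ftfcA_loop2, ftfcB_loop]
  | cons hd rest ih =>
    obtain ⟨s, e⟩ := hd
    by_cases h : s ≤ char_pos ∧ char_pos < e
    · simp [ftfcA_loop1, ftfcB_loop, h]
    · simp only [ftfcA_loop1, ftfcA_loop2, ftfcB_loop, if_neg h]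
      exact ih (i + 1) (if s ≤ char_pos then some i else best)

-- ===== VERDICT (by name: the statement is the Claim_ definition above) =====
theorem find_token_for_char_py_spec : Claim_equal_find_token_for_char_py := by
  intro offsets char_pos _
  unfold Spec_find_token_for_char_py find_token_for_char_py find_token_for_char_py_alt
  exact ftfc_merge char_pos offsets 0 none
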